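-- pv_equiv track=rewrite | github.com/DeciferBot/decifer-trading | scripts/phase1_session_report.py | _combo_label
-- ===== SOURCE A (Python) =====
-- SIG_THRESHOLD = 5
--
-- def _combo_label(flow, squeeze, momentum, threshold=SIG_THRESHOLD):
--     fires = [
--         ("flow", flow >= threshold),
--         ("squeeze", squeeze >= threshold),
--         ("momentum", momentum >= threshold),
--     ]
--     passing = [name for name, ok in fires if ok]
--     if len(passing) == 3:
--         return "all_three"
--     if len(passing) == 2:
--         pair = tuple(sorted(passing))
--         labels = {
--             ("flow", "squeeze"): "flow+squeeze",
--             ("flow", "momentum"): "flow+momentum",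
--             ("momentum", "squeeze"): "squeeze+momentum",
--         }
--         return labels.get(pair, "+".join(pair))
--     return f"only_{passing[0]}" if passing else "none"
-- ===== SOURCE B (Python) =====
-- _COMBO_TABLE = {
--     (True, True, True): "all_three",
--     (True, True, False): "flow+squeeze",
--     (True, False, True): "flow+momentum",
--     (False, True, True): "squeeze+momentum",
--     (True, False, False): "only_flow",
--     (False, True, False): "only_squeeze",
--     (False, False, True): "only_momentum",
--     (False, False, False): "none",
-- }
--
-- def _combo_label(flow, squeeze, momentum, threshold=5):
--     return _COMBO_TABLE[(flow >= threshold, squeeze >= threshold, momentum >= threshold)]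
-- ===== Notes on version B (the rewrite author's own statement) =====
-- stated objective: simpler
-- what changed: Replaced the passing-list construction, length branching, sort and pair-dict with a single precomputed 8-entry table lookup keyed by the three boolean test results.
import Mathlib
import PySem

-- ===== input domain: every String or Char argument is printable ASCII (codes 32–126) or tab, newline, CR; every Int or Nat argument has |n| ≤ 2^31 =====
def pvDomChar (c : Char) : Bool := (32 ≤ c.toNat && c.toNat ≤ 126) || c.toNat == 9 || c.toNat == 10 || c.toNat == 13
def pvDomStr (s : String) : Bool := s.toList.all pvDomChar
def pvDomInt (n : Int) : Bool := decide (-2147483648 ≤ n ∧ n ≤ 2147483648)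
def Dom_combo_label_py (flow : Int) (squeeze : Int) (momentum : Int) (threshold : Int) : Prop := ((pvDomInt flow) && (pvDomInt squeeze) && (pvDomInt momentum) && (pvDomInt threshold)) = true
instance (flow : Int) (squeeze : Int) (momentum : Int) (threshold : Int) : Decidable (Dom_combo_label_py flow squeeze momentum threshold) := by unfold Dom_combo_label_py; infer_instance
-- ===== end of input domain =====

-- B replaces A's passing-list / length-branch / sort / pair-dict logic with a single 8-entry table lookup keyed by the three boolean test results (objective: simpler).
-- ===== PORT A =====
-- Port of A: fires list, filter for passing names, length branching, sorted pair + dict lookup.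
def combo_label_py (flow : Int) (squeeze : Int) (momentum : Int) (threshold : Int) : String :=
  let fires : List (String × Bool) :=
    [("flow", decide (flow ≥ threshold)),
     ("squeeze", decide (squeeze ≥ threshold)),
     ("momentum", decide (momentum ≥ threshold))]
  let passing : List String := (fires.filter (fun p => p.2)).map (fun p => p.1)
  if passing.length = 3 then "all_three"
  else if passing.length = 2 then
    let pair : List String := PySem.List.sorted passing (fun x => x) false
    let labels : PySem.Dict (List String) String := PySem.Dict.ofList
      [(["flow", "squeeze"], "flow+squeeze"),
       (["flow", "momentum"], "flow+momentum"),
       (["momentum", "squeeze"], "squeeze+momentum")]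
    (PySem.Dict.get? labels pair).getD (PySem.Str.join "+" pair)
  else if passing ≠ [] then "only_" ++ passing.headD "" else "none"

-- ===== PORT B =====
-- Port of B: one lookup in the precomputed 8-entry table keyed by the three booleans.
def pvComboTable : PySem.Dict (Bool × Bool × Bool) String := PySem.Dict.ofList
  [((true, true, true), "all_three"),
   ((true, true, false), "flow+squeeze"),
   ((true, false, true), "flow+momentum"),
   ((false, true, true), "squeeze+momentum"),
   ((true, false, false), "only_flow"),
   ((false, true, false), "only_squeeze"),
   ((false, false, true), "only_momentum"),
   ((false, false, false), "none")]

def combo_label_py_alt (flow : Int) (squeeze : Int) (momentum : Int) (threshold : Int) : String :=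
  (PySem.Dict.get? pvComboTable
    (decide (flow ≥ threshold), decide (squeeze ≥ threshold), decide (momentum ≥ threshold))).getD ""

-- ===== PRECONDITION & SPEC =====
def Spec_combo_label_py (flow : Int) (squeeze : Int) (momentum : Int) (threshold : Int) (out : String) : Prop := out = combo_label_py_alt flow squeeze momentum threshold
instance (flow : Int) (squeeze : Int) (momentum : Int) (threshold : Int) (out : String) : Decidable (Spec_combo_label_py flow squeeze momentum threshold out) := by unfold Spec_combo_label_py; infer_instance

-- ===== CLAIM (what is proved, stated in full; the proofs are below) =====
def Claim_equal_combo_label_py : Prop := ∀ (flow : Int) (squeeze : Int) (momentum : Int) (threshold : Int), Dom_combo_label_py flow squeeze momentum threshold → Spec_combo_label_py flow squeeze momentum threshold (combo_label_py flow squeeze momentum threshold)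

-- ===== LEMMAS AND PROOFS =====

-- ===== VERDICT (by name: the statement is the Claim_ definition above) =====
theorem combo_label_py_spec : Claim_equal_combo_label_py := by
  intro flow squeeze momentum threshold _
  unfold Spec_combo_label_py combo_label_py combo_label_py_alt
  by_cases h0 : flow ≥ threshold <;> by_cases h1 : squeeze ≥ threshold <;>
    by_cases h2 : momentum ≥ threshold <;>
    simp [h0, h1, h2, pvComboTable, PySem.Dict.get?, PySem.List.sorted, PySem.Str.join] <;> rfl
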